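-- pv_equiv track=rewrite | github.com/jpfau/bark.py | bark.py | bark
-- ===== SOURCE A (Python) =====
-- dogs = {
-- # This is the default
-- 'puppy': '''
--      __
--     (,'`-;  @@
--     / ,-`
--    /  |
-- (\/_)_\_''',
-- # And because this meme just will not die, and people would add it anyway, I've
-- # added this in advance
-- 'shiba': '''   ,    ,
--   _|\__/ |
--  /     ` (
-- / o,,o  \ \  @@
-- |,#*     )|
--  >^-'   ' \
-- |`---      `'''
-- }
--
-- def bark(dog, message):
--     template = dogs[dog].split('\n')
--     message = message.split('\n')
--     rowLength = max([len(l) // 2 for l in message])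
--     rows = []
--     rows.append('  \\\'{}/'.format(''.join(['v\''] * rowLength)))
--     for line in message:
--         rows.append(' <{{: ^{}}}>'.format(rowLength * 2 + 3).format(line))
--     rows.append('_=^,{}\\'.format(''.join(['^,'] * rowLength)))
--     output = []
--     start = -1
--     # Reverse everything so that we construct the message from the bottom first
--     template.reverse()
--     for line in template:
--         if start < 0:
--             start = line.find('@@')
--         if start >= 0 and rows:
--             line = '{{: <{}}}'.format(start).format(line)
--             line = line[:start] + rows.pop()
--         output.append(line)
--     rows.reverse()
--     # If we have something left over after the message, put that on the top
--     for line in rows: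
--         output.append('{{: >{}}}'.format(start + len(line)).format(line))
--     output.reverse()
--     return '\n'.join(output)
-- ===== SOURCE B (Python) =====
-- dogs = {
-- # This is the default
-- 'puppy': '''
--      __
--     (,'`-;  @@
--     / ,-`
--    /  |
-- (\/_)_\_''',
-- # And because this meme just will not die, and people would add it anyway, I've
-- # added this in advance
-- 'shiba': '''   ,    ,
--   _|\__/ |
--  /     ` (
-- / o,,o  \ \  @@
-- |,#*     )|
--  >^-'   ' \
-- |`---      `'''
-- }
--
-- def bark(dog, message):
--     # Forward placement: find the anchor line/column, then lay the bubble rows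
--     # out top-down in one pass (no reversing, no popping).
--     template = dogs[dog].split('\n')
--     lines = message.split('\n')
--     width = max(len(l) // 2 for l in lines)
--     inner = width * 2 + 3
--     rows = ["  \\'" + "v'" * width + "/"]
--     for l in lines:
--         pad = inner - len(l)
--         left = pad // 2 if pad > 0 else 0
--         right = pad - left if pad > 0 else 0
--         rows.append(' <' + ' ' * left + l + ' ' * right + '>')
--     rows.append('_=^,' + '^,' * width + '\\')
--     # anchor: the last template line containing '@@'
--     i = len(template) - 1
--     while i > 0 and '@@' not in template[i]:
--         i -= 1
--     start = template[i].find('@@')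
--     m = len(rows)
--     k = max(0, m - (i + 1))          # rows that overflow above the template
--     top = max(0, (i + 1) - m)        # template lines left untouched above the bubble
--     out = [' ' * start + r for r in rows[:k]]
--     out += template[:top]
--     out += [t[:start].ljust(start) + r for t, r in zip(template[top:i + 1], rows[k:])]
--     out += template[i + 1:]
--     return '\n'.join(out)
-- ===== Notes on version B (the rewrite author's own statement) =====
-- stated objective: alternative
-- what changed: B replaces A's reverse-the-template-and-pop-rows-from-the-end construction by a single forward computation: it locates the anchor line and column once, computes with arithmetic how many bubble rows overflow the top and where the overlay region starts, and emits top block, untouched lines, zipped overlays and tail directly in order.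
-- outside the precondition, e.g. on bark('cat', 'hi'): A raises KeyError, B raises KeyError
import Mathlib
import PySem

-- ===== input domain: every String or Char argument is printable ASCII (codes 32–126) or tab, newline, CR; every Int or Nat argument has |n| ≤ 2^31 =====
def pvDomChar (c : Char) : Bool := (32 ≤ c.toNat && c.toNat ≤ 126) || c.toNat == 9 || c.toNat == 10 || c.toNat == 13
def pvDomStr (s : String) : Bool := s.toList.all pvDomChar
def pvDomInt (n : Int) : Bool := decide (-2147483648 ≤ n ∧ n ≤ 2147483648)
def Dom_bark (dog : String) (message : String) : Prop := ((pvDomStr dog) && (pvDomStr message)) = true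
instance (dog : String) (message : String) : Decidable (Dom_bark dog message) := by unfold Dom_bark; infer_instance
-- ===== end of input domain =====

-- B places the speech bubble in a single forward pass (anchor index + arithmetic placement with
-- zip/slices) instead of A's reverse-template-and-pop construction; objective: alternative decomposition.

-- shared module-level data: the dict 'dogs'
def barkDogs : PySem.Dict String String := PySem.Dict.mk
  [("puppy", "\n     __\n    (,'`-;  @@\n    / ,-` \n   /  |\n(\\/_)_\\_"),
   ("shiba", "   ,    ,\n  _|\\__/ | \n /     ` (\n/ o,,o  \\ \\  @@\n|,#*     )|\n >^-'   ' \\ \n|`---      `")]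

-- Python 'str * int' (exact: n concatenated copies, empty for n ≤ 0)
def pyStrMul (s : String) (n : Int) : String := PySem.Str.join "" (List.replicate n.toNat s)

-- '{: <w}'.format(s) / str.ljust(w): pad right with spaces to width w (no pad if len ≥ w)
def barkLJust (w : Int) (s : String) : String :=
  if w - PySem.Str.len s ≤ 0 then s else s ++ pyStrMul " " (w - PySem.Str.len s)

-- ===== PORT A =====
-- '{: >w}'.format(s): pad left with spaces to width w
def barkRJust (w : Int) (s : String) : String :=
  if w - PySem.Str.len s ≤ 0 then s else pyStrMul " " (w - PySem.Str.len s) ++ s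

-- '{: ^w}'.format(s): centre (CPython's rule: left pad = total pad // 2)
def barkCenter (w : Int) (s : String) : String :=
  if w - PySem.Str.len s ≤ 0 then s
  else pyStrMul " " (PySem.Int.floordiv (w - PySem.Str.len s) 2) ++ s
       ++ pyStrMul " " ((w - PySem.Str.len s) - PySem.Int.floordiv (w - PySem.Str.len s) 2)

-- the rows list A builds: header, then one append per message line, then footer
def barkRowsA (lines : List String) (rowLength : Int) : List String :=
  (lines.foldl (fun rs l => rs ++ [" <" ++ barkCenter (rowLength * 2 + 3) l ++ ">"])
      ["  \\'" ++ PySem.Str.join "" (PySem.List.pyRepeat ["v'"] rowLength) ++ "/"])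
  ++ ["_=^," ++ PySem.Str.join "" (PySem.List.pyRepeat ["^,"] rowLength) ++ "\\"]

-- one iteration of A's loop over the reversed template; state = (start, rows, output)
def barkStep (st : Int × List String × List String) (line : String) : Int × List String × List String :=
  let start := if st.1 < 0 then PySem.Str.find line "@@" else st.1
  if 0 ≤ start ∧ st.2.1 ≠ [] then
    match PySem.List.pop? st.2.1 with
    | some (r, rest) =>
        (start, rest, st.2.2 ++ [PySem.Str.slice (barkLJust start line) none (some start) ++ r])
    | none => (start, st.2.1, st.2.2 ++ [line])
  else (start, st.2.1, st.2.2 ++ [line])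

-- A's leftover loop over the remaining (re-reversed) rows, then the final output.reverse()
def barkFinish (fin : Int × List String × List String) : List String :=
  (fin.2.1.reverse.foldl (fun o r => o ++ [barkRJust (fin.1 + PySem.Str.len r) r]) fin.2.2).reverse

def barkAssemble (template rows : List String) : List String :=
  barkFinish (template.reverse.foldl barkStep (-1, rows, []))

def bark (dog : String) (message : String) : String :=
  -- dogs[dog]: Pre_bark guarantees the key is present; '\n' ≠ '' so split? is always some
  let template := (PySem.Str.split? (barkDogs.getD dog "") "\n").getD []
  let lines := (PySem.Str.split? message "\n").getD []
  -- max over the mapped list; split never yields [], so the default is never taken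
  let rowLength := (PySem.List.max? (lines.map (fun l => PySem.Int.floordiv (PySem.Str.len l) 2)) (fun x => x)).getD 0
  PySem.Str.join "\n" (barkAssemble template (barkRowsA lines rowLength))

-- ===== PORT B =====
-- one bubble row of B: explicit left/right pad arithmetic
def barkRowB (inner : Int) (l : String) : String :=
  " <" ++ pyStrMul " " (if 0 < inner - PySem.Str.len l then PySem.Int.floordiv (inner - PySem.Str.len l) 2 else 0)
  ++ l
  ++ pyStrMul " " (if 0 < inner - PySem.Str.len l then (inner - PySem.Str.len l) - PySem.Int.floordiv (inner - PySem.Str.len l) 2 else 0)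
  ++ ">"

def barkRowsB (lines : List String) (width : Int) : List String :=
  ("  \\'" ++ pyStrMul "v'" width ++ "/")
    :: lines.map (barkRowB (width * 2 + 3))
    ++ ["_=^," ++ pyStrMul "^," width ++ "\\"]

-- B's 'while i > 0 and "@@" not in template[i]: i -= 1'
def barkAnchor : List String → Nat → Nat
  | _, 0 => 0
  | t, Nat.succ i => if PySem.Str.isIn "@@" (t.getD (i + 1) "") then i + 1 else barkAnchor t i

-- B's forward placement: top overflow block, untouched top lines, overlay zip, untouched tail
def barkPlaceCore (template rows : List String) (i : Nat) (start : Int) : List String :=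
  ((PySem.List.slice rows none (some (max 0 (PySem.List.len rows - ((i:Int)+1))))).map
      (fun r => pyStrMul " " start ++ r))
  ++ PySem.List.slice template none (some (max 0 (((i:Int)+1) - PySem.List.len rows)))
  ++ ((PySem.List.slice template (some (max 0 (((i:Int)+1) - PySem.List.len rows))) (some ((i:Int)+1))).zip
       (PySem.List.slice rows (some (max 0 (PySem.List.len rows - ((i:Int)+1)))) none)).map
       (fun p => barkLJust start (PySem.Str.slice p.1 none (some start)) ++ p.2)
  ++ PySem.List.slice template (some ((i:Int)+1)) none

def barkPlace (template rows : List String) : List String :=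
  barkPlaceCore template rows (barkAnchor template (template.length - 1))
    (PySem.Str.find (template.getD (barkAnchor template (template.length - 1)) "") "@@")

def bark_alt (dog : String) (message : String) : String :=
  let template := (PySem.Str.split? (barkDogs.getD dog "") "\n").getD []
  let lines := (PySem.Str.split? message "\n").getD []
  let width := (PySem.List.max? (lines.map (fun l => PySem.Int.floordiv (PySem.Str.len l) 2)) (fun x => x)).getD 0
  PySem.Str.join "\n" (barkPlace template (barkRowsB lines width))

-- ===== PRECONDITION & SPEC =====
-- Pre_ excludes unknown dog names, on which A raises KeyError at dogs[dog].
def Pre_bark (dog : String) (message : String) : Prop := dog = "puppy" ∨ dog = "shiba"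
instance (dog : String) (message : String) : Decidable (Pre_bark dog message) := by unfold Pre_bark; infer_instance
def pvWitness_bark : String × String := ("puppy", "hello\nworld")

def Spec_bark (dog : String) (message : String) (out : String) : Prop := out = bark_alt dog message
instance (dog : String) (message : String) (out : String) : Decidable (Spec_bark dog message out) := by unfold Spec_bark; infer_instance

-- ===== CLAIM (what is proved, stated in full; the proofs are below) =====
def Claim_equal_bark : Prop := ∀ (dog : String) (message : String), Dom_bark dog message → Pre_bark dog message → Spec_bark dog message (bark dog message)

-- ===== LEMMAS AND PROOFS =====

def barkPuppyT : List String := ["", "     __", "    (,'`-;  @@", "    / ,-` ", "   /  |", "(\\/_)_\\_"]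
def barkShibaT : List String := ["   ,    ,", "  _|\\__/ | ", " /     ` (", "/ o,,o  \\ \\  @@", "|,#*     )|", " >^-'   ' \\ ", "|`---      `"]

lemma bark_foldl_snoc {α β : Type} (f : α → β) (xs : List α) (init : List β) :
    xs.foldl (fun o r => o ++ [f r]) init = init ++ xs.map f := by
  induction xs generalizing init with
  | nil => simp
  | cons x xs ih => simp [List.foldl, ih]

lemma bark_rjust_eq (st : Int) (r : String) (h : 0 ≤ st) :
    barkRJust (st + PySem.Str.len r) r = pyStrMul " " st ++ r := by
  unfold barkRJust
  have e : st + PySem.Str.len r - PySem.Str.len r = st := by ring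
  rw [e]
  split_ifs with h1
  · have : st = 0 := le_antisymm h1 h
    simp [this, show pyStrMul " " 0 = "" from by decide]
  · rfl

lemma bark_row_eq (w : Int) (l : String) : " <" ++ barkCenter w l ++ ">" = barkRowB w l := by
  unfold barkCenter barkRowB
  have hm : pyStrMul " " 0 = "" := by decide
  split_ifs with h1 h2 h3
  · omega
  · simp [hm, String.append_assoc]
  · simp [String.append_assoc]
  · omega

lemma bark_rows_eq (lines : List String) (w : Int) : barkRowsA lines w = barkRowsB lines w := by
  unfold barkRowsA barkRowsB
  rw [bark_foldl_snoc]
  simp [PySem.List.pyRepeat_singleton, pyStrMul, bark_row_eq]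

lemma bark_concat3 {α : Type} (R : List α) :
    R = [] ∨ (∃ a, R = [a]) ∨ (∃ a b, R = [a, b]) ∨ ∃ L a b c, R = L ++ [a, b, c] := by
  rcases List.eq_nil_or_concat R with rfl | ⟨L1, c, rfl⟩
  · exact Or.inl rfl
  rcases List.eq_nil_or_concat L1 with rfl | ⟨L2, b, rfl⟩
  · exact Or.inr (Or.inl ⟨c, rfl⟩)
  rcases List.eq_nil_or_concat L2 with rfl | ⟨L3, a, rfl⟩
  · exact Or.inr (Or.inr (Or.inl ⟨b, c, by simp⟩))
  · exact Or.inr (Or.inr (Or.inr ⟨L3, a, b, c, by simp⟩))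

lemma bark_step_skip (R out : List String) (line : String)
    (h : PySem.Chars.find line.toList ['@', '@'] = -1) :
    barkStep (-1, R, out) line = (-1, R, out ++ [line]) := by
  unfold barkStep
  simp [h]

lemma bark_step_pop (st : Int) (h : 0 ≤ st) (R : List String) (x : String) (out : List String) (line : String) :
    barkStep (st, R ++ [x], out) line
      = (st, R, out ++ [PySem.Str.slice (barkLJust st line) none (some st) ++ x]) := by
  unfold barkStep
  simp [not_lt.mpr h, h, PySem.List.pop?_last]

lemma bark_step_found (st : Int) (R : List String) (x : String) (out : List String) (line : String)
    (hf : PySem.Chars.find line.toList ['@', '@'] = st) (h : 0 ≤ st) :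
    barkStep (-1, R ++ [x], out) line
      = (st, R, out ++ [PySem.Str.slice (barkLJust st line) none (some st) ++ x]) := by
  unfold barkStep
  simp [hf, h, PySem.List.pop?_last]

lemma bark_step_empty (st : Int) (h : 0 ≤ st) (out : List String) (line : String) :
    barkStep (st, [], out) line = (st, [], out ++ [line]) := by
  unfold barkStep
  simp [not_lt.mpr h]

lemma bark_loop_puppy (R : List String) : barkAssemble barkPuppyT R = barkPlace barkPuppyT R := by
  rcases bark_concat3 R with rfl | ⟨a, rfl⟩ | ⟨a, b, rfl⟩ | ⟨L, a, b, c, rfl⟩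
  · decide
  · unfold barkAssemble
    rw [show barkPuppyT.reverse = ["(\\/_)_\\_", "   /  |", "    / ,-` ", "    (,'`-;  @@", "     __", ""] from by decide]
    simp only [List.foldl]
    rw [show ([a] : List String) = [] ++ [a] from by simp,
        bark_step_skip _ _ _ (by decide), bark_step_skip _ _ _ (by decide), bark_step_skip _ _ _ (by decide),
        bark_step_found 12 _ _ _ _ (by decide) (by norm_num),
        bark_step_empty 12 (by norm_num), bark_step_empty 12 (by norm_num)]
    unfold barkFinish barkPlace barkPlaceCore
    rw [show barkAnchor barkPuppyT (barkPuppyT.length - 1) = 2 from by decide,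
        show PySem.Str.find (barkPuppyT.getD 2 "") "@@" = 12 from by decide]
    have o2 : PySem.Str.slice (barkLJust 12 "    (,'`-;  @@") none (some 12) = barkLJust 12 (PySem.Str.slice "    (,'`-;  @@" none (some 12)) := by decide
    simp [o2, List.zip, PySem.List.slice, PySem.List.clampIdx, PySem.List.len_eq, barkPuppyT]
  · unfold barkAssemble
    rw [show barkPuppyT.reverse = ["(\\/_)_\\_", "   /  |", "    / ,-` ", "    (,'`-;  @@", "     __", ""] from by decide]
    simp only [List.foldl]
    rw [show ([a, b] : List String) = ([] ++ [a]) ++ [b] from by simp,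
        bark_step_skip _ _ _ (by decide), bark_step_skip _ _ _ (by decide), bark_step_skip _ _ _ (by decide),
        bark_step_found 12 _ _ _ _ (by decide) (by norm_num),
        bark_step_pop 12 (by norm_num), bark_step_empty 12 (by norm_num)]
    unfold barkFinish barkPlace barkPlaceCore
    rw [show barkAnchor barkPuppyT (barkPuppyT.length - 1) = 2 from by decide,
        show PySem.Str.find (barkPuppyT.getD 2 "") "@@" = 12 from by decide]
    have o1 : PySem.Str.slice (barkLJust 12 "     __") none (some 12) = barkLJust 12 (PySem.Str.slice "     __" none (some 12)) := by decide
    have o2 : PySem.Str.slice (barkLJust 12 "    (,'`-;  @@") none (some 12) = barkLJust 12 (PySem.Str.slice "    (,'`-;  @@" none (some 12)) := by decide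
    simp [o1, o2, List.zip, PySem.List.slice, PySem.List.clampIdx, PySem.List.len_eq, barkPuppyT]
  · have e1 : L ++ [a, b, c] = (L ++ [a, b]) ++ [c] := by simp
    have e2 : L ++ [a, b] = (L ++ [a]) ++ [b] := by simp
    unfold barkAssemble
    rw [show barkPuppyT.reverse = ["(\\/_)_\\_", "   /  |", "    / ,-` ", "    (,'`-;  @@", "     __", ""] from by decide]
    simp only [List.foldl]
    rw [bark_step_skip _ _ _ (by decide), bark_step_skip _ _ _ (by decide), bark_step_skip _ _ _ (by decide),
        e1, bark_step_found 12 _ _ _ _ (by decide) (by norm_num),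
        e2, bark_step_pop 12 (by norm_num), bark_step_pop 12 (by norm_num)]
    unfold barkFinish
    simp only []
    rw [bark_foldl_snoc]
    unfold barkPlace
    rw [show barkAnchor barkPuppyT (barkPuppyT.length - 1) = 2 from by decide]
    rw [show PySem.Str.find (barkPuppyT.getD 2 "") "@@" = 12 from by decide]
    unfold barkPlaceCore
    simp only [List.append_assoc, List.cons_append, List.nil_append]
    have hk : max (0:Int) (PySem.List.len (L ++ [a, b, c]) - (((2:Nat):Int) + 1)) = (L.length : Int) := by
      simp [PySem.List.len_eq]
    have htop : max (0:Int) ((((2:Nat):Int) + 1) - PySem.List.len (L ++ [a, b, c])) = 0 := by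
      simp [PySem.List.len_eq]
    rw [hk, htop]
    rw [PySem.List.slice_to_natCast, PySem.List.slice_from_natCast, List.take_left, List.drop_left]
    rw [show PySem.List.slice barkPuppyT none (some (0:Int)) = [] from by decide]
    rw [show PySem.List.slice barkPuppyT (some (0:Int)) (some (((2:Nat):Int)+1)) = ["", "     __", "    (,'`-;  @@"] from by decide]
    rw [show PySem.List.slice barkPuppyT (some (((2:Nat):Int)+1)) none = ["    / ,-` ", "   /  |", "(\\/_)_\\_"] from by decide]
    have o0 : PySem.Str.slice (barkLJust 12 "") none (some 12) = barkLJust 12 (PySem.Str.slice "" none (some 12)) := by decide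
    have o1 : PySem.Str.slice (barkLJust 12 "     __") none (some 12) = barkLJust 12 (PySem.Str.slice "     __" none (some 12)) := by decide
    have o2 : PySem.Str.slice (barkLJust 12 "    (,'`-;  @@") none (some 12) = barkLJust 12 (PySem.Str.slice "    (,'`-;  @@" none (some 12)) := by decide
    simp [o0, o1, o2, List.zip]
    intro r _
    have h2 := bark_rjust_eq 12 r (by norm_num)
    simpa using h2

lemma bark_loop_shiba (R : List String) : barkAssemble barkShibaT R = barkPlace barkShibaT R := by
  have hcase := bark_concat3 R
  rcases hcase with rfl | ⟨a, rfl⟩ | ⟨a, b, rfl⟩ | ⟨L, a, b, c, rfl⟩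
  · decide
  · unfold barkAssemble
    rw [show barkShibaT.reverse = ["|`---      `", " >^-'   ' \\ ", "|,#*     )|", "/ o,,o  \\ \\  @@", " /     ` (", "  _|\\__/ | ", "   ,    ,"] from by decide]
    simp only [List.foldl]
    rw [show ([a] : List String) = [] ++ [a] from by simp,
        bark_step_skip _ _ _ (by decide), bark_step_skip _ _ _ (by decide), bark_step_skip _ _ _ (by decide),
        bark_step_found 13 _ _ _ _ (by decide) (by norm_num),
        bark_step_empty 13 (by norm_num), bark_step_empty 13 (by norm_num), bark_step_empty 13 (by norm_num)]
    unfold barkFinish barkPlace barkPlaceCore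
    rw [show barkAnchor barkShibaT (barkShibaT.length - 1) = 3 from by decide,
        show PySem.Str.find (barkShibaT.getD 3 "") "@@" = 13 from by decide]

    have o0 : PySem.Str.slice (barkLJust 13 "   ,    ,") none (some 13) = barkLJust 13 (PySem.Str.slice "   ,    ," none (some 13)) := by decide
    have o1 : PySem.Str.slice (barkLJust 13 "  _|\\__/ | ") none (some 13) = barkLJust 13 (PySem.Str.slice "  _|\\__/ | " none (some 13)) := by decide
    have o2 : PySem.Str.slice (barkLJust 13 " /     ` (") none (some 13) = barkLJust 13 (PySem.Str.slice " /     ` (" none (some 13)) := by decide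
    have o3 : PySem.Str.slice (barkLJust 13 "/ o,,o  \\ \\  @@") none (some 13) = barkLJust 13 (PySem.Str.slice "/ o,,o  \\ \\  @@" none (some 13)) := by decide
    simp [o3, List.zip, PySem.List.slice, PySem.List.clampIdx, PySem.List.len_eq, barkShibaT]
  · unfold barkAssemble
    rw [show barkShibaT.reverse = ["|`---      `", " >^-'   ' \\ ", "|,#*     )|", "/ o,,o  \\ \\  @@", " /     ` (", "  _|\\__/ | ", "   ,    ,"] from by decide]
    simp only [List.foldl]
    rw [show ([a, b] : List String) = ([] ++ [a]) ++ [b] from by simp,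
        bark_step_skip _ _ _ (by decide), bark_step_skip _ _ _ (by decide), bark_step_skip _ _ _ (by decide),
        bark_step_found 13 _ _ _ _ (by decide) (by norm_num),
        bark_step_pop 13 (by norm_num), bark_step_empty 13 (by norm_num), bark_step_empty 13 (by norm_num)]
    unfold barkFinish barkPlace barkPlaceCore
    rw [show barkAnchor barkShibaT (barkShibaT.length - 1) = 3 from by decide,
        show PySem.Str.find (barkShibaT.getD 3 "") "@@" = 13 from by decide]

    have o0 : PySem.Str.slice (barkLJust 13 "   ,    ,") none (some 13) = barkLJust 13 (PySem.Str.slice "   ,    ," none (some 13)) := by decide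
    have o1 : PySem.Str.slice (barkLJust 13 "  _|\\__/ | ") none (some 13) = barkLJust 13 (PySem.Str.slice "  _|\\__/ | " none (some 13)) := by decide
    have o2 : PySem.Str.slice (barkLJust 13 " /     ` (") none (some 13) = barkLJust 13 (PySem.Str.slice " /     ` (" none (some 13)) := by decide
    have o3 : PySem.Str.slice (barkLJust 13 "/ o,,o  \\ \\  @@") none (some 13) = barkLJust 13 (PySem.Str.slice "/ o,,o  \\ \\  @@" none (some 13)) := by decide
    simp [o2, o3, List.zip, PySem.List.slice, PySem.List.clampIdx, PySem.List.len_eq, barkShibaT]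
  · rcases List.eq_nil_or_concat L with rfl | ⟨L', d, rfl⟩
    · unfold barkAssemble
      rw [show barkShibaT.reverse = ["|`---      `", " >^-'   ' \\ ", "|,#*     )|", "/ o,,o  \\ \\  @@", " /     ` (", "  _|\\__/ | ", "   ,    ,"] from by decide]
      simp only [List.foldl, List.nil_append]
      rw [show ([a, b, c] : List String) = (([] ++ [a]) ++ [b]) ++ [c] from by simp,
          bark_step_skip _ _ _ (by decide), bark_step_skip _ _ _ (by decide), bark_step_skip _ _ _ (by decide),
          bark_step_found 13 _ _ _ _ (by decide) (by norm_num),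
          bark_step_pop 13 (by norm_num), bark_step_pop 13 (by norm_num), bark_step_empty 13 (by norm_num)]
      unfold barkFinish barkPlace barkPlaceCore
      rw [show barkAnchor barkShibaT (barkShibaT.length - 1) = 3 from by decide,
          show PySem.Str.find (barkShibaT.getD 3 "") "@@" = 13 from by decide]

      have o0 : PySem.Str.slice (barkLJust 13 "   ,    ,") none (some 13) = barkLJust 13 (PySem.Str.slice "   ,    ," none (some 13)) := by decide
      have o1 : PySem.Str.slice (barkLJust 13 "  _|\\__/ | ") none (some 13) = barkLJust 13 (PySem.Str.slice "  _|\\__/ | " none (some 13)) := by decide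
      have o2 : PySem.Str.slice (barkLJust 13 " /     ` (") none (some 13) = barkLJust 13 (PySem.Str.slice " /     ` (" none (some 13)) := by decide
      have o3 : PySem.Str.slice (barkLJust 13 "/ o,,o  \\ \\  @@") none (some 13) = barkLJust 13 (PySem.Str.slice "/ o,,o  \\ \\  @@" none (some 13)) := by decide
      simp [o1, o2, o3, List.zip, PySem.List.slice, PySem.List.clampIdx, PySem.List.len_eq, barkShibaT]
    · simp only [List.concat_eq_append]
      have e1 : (L' ++ [d]) ++ [a, b, c] = ((L' ++ [d, a]) ++ [b]) ++ [c] := by simp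
      have e2 : L' ++ [d, a] = (L' ++ [d]) ++ [a] := by simp
      unfold barkAssemble
      rw [show barkShibaT.reverse = ["|`---      `", " >^-'   ' \\ ", "|,#*     )|", "/ o,,o  \\ \\  @@", " /     ` (", "  _|\\__/ | ", "   ,    ,"] from by decide]
      simp only [List.foldl]
      rw [e1, bark_step_skip _ _ _ (by decide), bark_step_skip _ _ _ (by decide), bark_step_skip _ _ _ (by decide),
          bark_step_found 13 _ _ _ _ (by decide) (by norm_num),
          bark_step_pop 13 (by norm_num), e2, bark_step_pop 13 (by norm_num), bark_step_pop 13 (by norm_num)]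
      unfold barkFinish
      simp only []
      rw [bark_foldl_snoc]
      unfold barkPlace barkPlaceCore
      rw [show barkAnchor barkShibaT (barkShibaT.length - 1) = 3 from by decide,
          show PySem.Str.find (barkShibaT.getD 3 "") "@@" = 13 from by decide]

      simp only [List.append_assoc, List.cons_append, List.nil_append]
      have hk : max (0:Int) (PySem.List.len (L' ++ [d, a, b, c]) - (((3:Nat):Int) + 1)) = (L'.length : Int) := by
        simp [PySem.List.len_eq]
      have htop : max (0:Int) ((((3:Nat):Int) + 1) - PySem.List.len (L' ++ [d, a, b, c])) = 0 := by
        simp [PySem.List.len_eq]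
      rw [hk, htop]
      rw [PySem.List.slice_to_natCast, PySem.List.slice_from_natCast, List.take_left, List.drop_left]
      rw [show PySem.List.slice barkShibaT none (some (0:Int)) = [] from by decide]
      rw [show PySem.List.slice barkShibaT (some (0:Int)) (some (((3:Nat):Int)+1)) = ["   ,    ,", "  _|\\__/ | ", " /     ` (", "/ o,,o  \\ \\  @@"] from by decide]
      rw [show PySem.List.slice barkShibaT (some (((3:Nat):Int)+1)) none = ["|,#*     )|", " >^-'   ' \\ ", "|`---      `"] from by decide]
      have o0 : PySem.Str.slice (barkLJust 13 "   ,    ,") none (some 13) = barkLJust 13 (PySem.Str.slice "   ,    ," none (some 13)) := by decide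
      have o1 : PySem.Str.slice (barkLJust 13 "  _|\\__/ | ") none (some 13) = barkLJust 13 (PySem.Str.slice "  _|\\__/ | " none (some 13)) := by decide
      have o2 : PySem.Str.slice (barkLJust 13 " /     ` (") none (some 13) = barkLJust 13 (PySem.Str.slice " /     ` (" none (some 13)) := by decide
      have o3 : PySem.Str.slice (barkLJust 13 "/ o,,o  \\ \\  @@") none (some 13) = barkLJust 13 (PySem.Str.slice "/ o,,o  \\ \\  @@" none (some 13)) := by decide
      simp [o0, o1, o2, o3, List.zip]
      intro r _
      have h2 := bark_rjust_eq 13 r (by norm_num)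
      simpa using h2

-- ===== VERDICT (by name: the statement is the Claim_ definition above) =====
theorem bark_spec : Claim_equal_bark := by
  intro dog message _ hpre
  unfold Spec_bark bark bark_alt
  rcases hpre with rfl | rfl
  · simp only [show (PySem.Str.split? (barkDogs.getD "puppy" "") "\n").getD [] = barkPuppyT from by decide,
      bark_rows_eq, bark_loop_puppy]
  · simp only [show (PySem.Str.split? (barkDogs.getD "shiba" "") "\n").getD [] = barkShibaT from by decide,
      bark_rows_eq, bark_loop_shiba]
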